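-- pv_equiv track=rewrite | github.com/pennz1/poe-workflow | app.py | _strip_first_heading
-- ===== SOURCE A (Python) =====
-- def _strip_first_heading(content: str) -> str:
--     """去掉 Markdown 内容中的第一个 # 标题行（因为封面已经显示了标题）。"""
--     lines = content.split("\n")
--     result = []
--     found = False
--     for line in lines:
--         stripped = line.strip()
--         if not found and stripped.startswith("# ") and not stripped.startswith("## "):
--             found = True
--             continue  # 跳过第一个 # 标题
--         result.append(line)
--     return "\n".join(result)
-- ===== SOURCE B (Python) =====
-- def _strip_first_heading(content: str) -> str:
--     """去掉 Markdown 内容中的第一个 # 标题行（因为封面已经显示了标题）。"""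
--     # Scan the string itself by newline positions (no split/join, no line list):
--     # locate the first line whose stripped text starts with "# " and splice it
--     # out of the original string with two slices.
--     start = 0
--     while True:
--         end = content.find("\n", start)
--         line = content[start:end] if end != -1 else content[start:]
--         if line.strip().startswith("# "):
--             if end != -1:
--                 return content[:start] + content[end + 1:]
--             return content[:start - 1] if start > 0 else ""
--         if end == -1:
--             return content
--         start = end + 1
-- ===== Notes on version B (the rewrite author's own statement) =====
-- stated objective: alternative
-- what changed: Instead of splitting the text into a line list and filtering it with a found-flag then rejoining, B never builds a line list: it walks the original string by successive newline positions (str.find with a start offset) and, when a stripped segment carries the top-level heading marker, returns the string spliced together from two slices of the original (dropping the redundant double-hash test, which never fires when the single-hash test holds).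
import Mathlib
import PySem

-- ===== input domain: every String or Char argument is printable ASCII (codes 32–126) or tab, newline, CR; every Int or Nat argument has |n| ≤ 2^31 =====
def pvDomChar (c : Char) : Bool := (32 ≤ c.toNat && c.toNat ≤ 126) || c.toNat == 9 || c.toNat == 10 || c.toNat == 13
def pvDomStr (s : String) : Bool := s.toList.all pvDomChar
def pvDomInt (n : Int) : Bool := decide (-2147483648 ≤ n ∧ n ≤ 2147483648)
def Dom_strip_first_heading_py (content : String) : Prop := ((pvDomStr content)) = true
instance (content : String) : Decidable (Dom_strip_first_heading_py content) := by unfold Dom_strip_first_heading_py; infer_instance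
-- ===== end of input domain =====

-- B abandons the line-list filter loop of A entirely: it scans the original string by
-- newline positions (str.find with a start index) and splices the heading line out with
-- two slices of the original string; objective: alternative (same O(n) cost).


-- ===== PORT A =====
-- A's loop body: skip the first line whose strip starts with "# " but not "## ", append the rest.
def pvStepA (acc : List String × Bool) (line : String) : List String × Bool :=
  let stripped := PySem.Str.strip line
  if !acc.2 && PySem.Str.startswith stripped "# " && !PySem.Str.startswith stripped "## " then
    (acc.1, true)
  else
    (acc.1 ++ [line], acc.2)

def strip_first_heading_py (content : String) : String :=
  let lines := ((PySem.Str.split? content "\n").getD [])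
  PySem.Str.join "\n" (lines.foldl pvStepA ([], false)).1

-- ===== PORT B =====
-- B's heading test: line.strip().startswith("# ")
def pvHeadB (line : List Char) : Bool :=
  PySem.Chars.startswith (PySem.Chars.strip line) ['#', ' ']

-- B's while loop over the cursor `start`; fuel (cs.length + 1 at the call) only makes the
-- recursion structural — with enough fuel the 0 branch is never reached.
def pvGoB (cs : List Char) : Nat → Nat → List Char
  | 0, _ => cs
  | fuel + 1, start =>
    let e : Int := PySem.Chars.findFrom cs ['\n'] (start : Int)   -- content.find("\n", start)
    let line : List Char :=
      if e ≠ -1 then PySem.List.slice cs (some (start : Int)) (some e)   -- content[start:end]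
      else PySem.List.slice cs (some (start : Int)) none                 -- content[start:]
    if pvHeadB line then
      if e ≠ -1 then
        PySem.List.slice cs none (some (start : Int)) ++ PySem.List.slice cs (some (e + 1)) none
      else if 0 < start then PySem.List.slice cs none (some ((start - 1 : Nat) : Int)) else []
    else if e = -1 then cs
    else pvGoB cs fuel (e.toNat + 1)

def strip_first_heading_py_alt (content : String) : String :=
  String.ofList (pvGoB content.toList (content.toList.length + 1) 0)

-- ===== PRECONDITION & SPEC =====
def Spec_strip_first_heading_py (content : String) (out : String) : Prop := out = strip_first_heading_py_alt content
instance (content : String) (out : String) : Decidable (Spec_strip_first_heading_py content out) := by unfold Spec_strip_first_heading_py; infer_instance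

-- ===== CLAIM (what is proved, stated in full; the proofs are below) =====
def Claim_equal_strip_first_heading_py : Prop := ∀ (content : String), Dom_strip_first_heading_py content → Spec_strip_first_heading_py content (strip_first_heading_py content)

-- ===== LEMMAS AND PROOFS =====

-- A's heading test, on Strings
def pvIsHeading (line : String) : Bool := PySem.Str.startswith (PySem.Str.strip line) "# "

-- proof-side model of splitting on '\n'
def pvSplitNL : List Char → List (List Char)
  | [] => [[]]
  | c :: t =>
    if c = '\n' then [] :: pvSplitNL t
    else
      match pvSplitNL t with
      | [] => [[c]]
      | h :: r => (c :: h) :: r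

def pvPre (p : List Char) : List (List Char) → List (List Char)
  | [] => [p]
  | h :: r => (p ++ h) :: r

theorem pvSplitNL_ne_nil (l : List Char) : pvSplitNL l ≠ [] := by
  cases l with
  | nil => simp [pvSplitNL]
  | cons c t =>
    simp only [pvSplitNL]
    split_ifs
    · simp
    · cases h : pvSplitNL t <;> simp

theorem pv_go_eq (fuel : Nat) (l cur : List Char) (h : l.length < fuel) :
    ∀ (accl : List (List Char)), PySem.Chars.splitOn.go ['\n'] fuel l cur accl
      = accl.reverse ++ pvPre cur.reverse (pvSplitNL l) := by
  induction fuel generalizing l cur with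
  | zero => omega
  | succ f ih =>
    intro accl
    cases l with
    | nil => simp [PySem.Chars.splitOn.go, pvSplitNL, pvPre]
    | cons c rest =>
      rw [PySem.Chars.splitOn.go]
      by_cases hc : c = '\n'
      · subst hc
        simp only [List.isPrefixOf, beq_self_eq_true, Bool.true_and, if_true]
        rw [ih _ _ (by simpa using Nat.lt_of_succ_lt_succ h)]
        cases hs : pvSplitNL rest with
        | nil => exact absurd hs (pvSplitNL_ne_nil rest)
        | cons a b => simp [pvSplitNL, pvPre, hs]
      · have : (['\n'].isPrefixOf (c :: rest)) = false := by
          simp [List.isPrefixOf]; exact fun hh => absurd hh.symm hc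
        rw [this]
        simp only [Bool.false_eq_true, if_false]
        rw [ih _ _ (by simpa using Nat.lt_of_succ_lt_succ h)]
        cases hs : pvSplitNL rest with
        | nil => exact absurd hs (pvSplitNL_ne_nil rest)
        | cons a b => simp [pvSplitNL, pvPre, hs, hc]

theorem pv_splitOn_nl (cs : List Char) : PySem.Chars.splitOn cs ['\n'] = pvSplitNL cs := by
  rw [PySem.Chars.splitOn, pv_go_eq _ _ _ (by omega)]
  cases hs : pvSplitNL cs with
  | nil => exact absurd hs (pvSplitNL_ne_nil cs)
  | cons a b => simp [pvPre]

theorem pv_join_splitNL (l : List Char) : PySem.Chars.join ['\n'] (pvSplitNL l) = l := by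
  induction l with
  | nil => simp [pvSplitNL, PySem.Chars.join_singleton]
  | cons c t ih =>
    by_cases hc : c = '\n'
    · subst hc
      simp only [pvSplitNL, if_true]
      cases hs : pvSplitNL t with
      | nil => exact absurd hs (pvSplitNL_ne_nil t)
      | cons a b =>
        rw [PySem.Chars.join_cons_cons, ← hs, ih]
        simp
    · simp only [pvSplitNL, hc, if_false]
      cases hs : pvSplitNL t with
      | nil => exact absurd hs (pvSplitNL_ne_nil t)
      | cons a b =>
        cases b with
        | nil =>
          rw [PySem.Chars.join_singleton]
          rw [hs, PySem.Chars.join_singleton] at ih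
          simp [ih]
        | cons a2 b2 =>
          rw [PySem.Chars.join_cons_cons]
          rw [hs, PySem.Chars.join_cons_cons] at ih
          simp only [List.cons_append, List.append_assoc, List.nil_append] at ih ⊢
          simpa using ih

theorem pv_splitNL_no_nl (l : List Char) (h : '\n' ∉ l) : pvSplitNL l = [l] := by
  induction l with
  | nil => simp [pvSplitNL]
  | cons c t ih =>
    simp only [List.mem_cons, not_or] at h
    simp [pvSplitNL, Ne.symm h.1, ih h.2]

theorem pv_splitNL_append (a b : List Char) (h : '\n' ∉ a) :
    pvSplitNL (a ++ '\n' :: b) = a :: pvSplitNL b := by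
  induction a with
  | nil => simp [pvSplitNL]
  | cons c t ih =>
    simp only [List.mem_cons, not_or] at h
    simp [pvSplitNL, Ne.symm h.1, ih h.2]

theorem pv_heading_bridge (l : List Char) : pvIsHeading (String.ofList l) = pvHeadB l := by
  simp [pvIsHeading, pvHeadB, PySem.Str.startswith, PySem.Str.strip]

theorem pv_no_nl_of_find_neg (d : List Char) (h : PySem.Chars.find d ['\n'] = -1) : '\n' ∉ d := by
  rw [PySem.Chars.find_eq_neg_one_iff] at h
  intro hm
  obtain ⟨l1, l2, rfl⟩ := List.append_of_mem hm
  exact h ⟨l1, l2, by simp⟩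

theorem pv_goB_eq (cs : List Char) (fuel start : Nat) (hs : start ≤ cs.length)
    (hf : cs.length - start < fuel) :
    pvGoB cs fuel start =
      match (pvSplitNL (cs.drop start)).findIdx? pvHeadB with
      | none => cs
      | some i =>
        let ls := pvSplitNL (cs.drop start)
        let ls' := ls.take i ++ ls.drop (i + 1)
        if ls' = [] then cs.take (start - 1)
        else cs.take start ++ PySem.Chars.join ['\n'] ls' := by
  induction fuel generalizing start with
  | zero => omega
  | succ f ih =>
    rw [pvGoB]
    rw [PySem.Chars.findFrom_natCast cs ['\n'] start hs]
    set d := cs.drop start with hd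
    by_cases hfd : PySem.Chars.find d ['\n'] = -1
    · -- no newline after start: current line is d itself
      have hnl : '\n' ∉ d := pv_no_nl_of_find_neg d hfd
      rw [if_pos hfd]
      simp only [ne_eq, not_true_eq_false, if_false]
      rw [PySem.List.slice_from_natCast]
      rw [pv_splitNL_no_nl d hnl]
      rw [hd] at hnl ⊢
      by_cases hh : pvHeadB (List.drop start cs)
      · simp only [hh, if_true, List.findIdx?_cons, List.findIdx?_nil, Option.map_none]
        simp only [List.take_zero, List.drop_succ_cons, List.drop_nil, List.append_nil]
        by_cases h0 : 0 < start
        · rw [if_pos h0, PySem.List.slice_to_natCast]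
          simp
        · have h00 : start = 0 := by omega
          subst h00
          simp
      · simp [hh]
    · -- newline found at d-index k
      have hge : 0 ≤ PySem.Chars.find d ['\n'] := by
        have := PySem.Chars.neg_one_le_find d ['\n']
        omega
      set k := (PySem.Chars.find d ['\n']).toNat with hk
      obtain ⟨hpre, hmin⟩ := PySem.Chars.find_spec (s := d) (sub := ['\n']) hge
      have hklen : k < d.length := by
        rcases hpre with ⟨t, ht⟩
        have : (d.drop k).length = 1 + t.length := by rw [← ht]; simp; omega
        simp at this
        omega
      have hdk : d.drop k = '\n' :: d.drop (k + 1) := by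
        rcases hpre with ⟨t, ht⟩
        rw [← ht]
        have : (d.drop k).tail = d.drop (k + 1) := by
          rw [List.tail_drop]
        rw [← ht] at this
        simpa using this
      have hline_no_nl : '\n' ∉ d.take k := by
        intro hm
        obtain ⟨i, hi, hgi⟩ := List.mem_iff_getElem.mp hm
        have hik : i < k := by simp at hi; omega
        refine hmin i hik ⟨(d.drop i).tail, ?_⟩
        have hid : i < d.length := by omega
        rw [List.getElem_take] at hgi
        calc ['\n'] ++ (d.drop i).tail = '\n' :: (d.drop i).tail := by simp
        _ = d.drop i := by
            rw [List.drop_eq_getElem_cons hid, hgi]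
            simp
      rw [if_neg hfd]
      simp only [ne_eq]
      have hcast : (↑start + PySem.Chars.find d ['\n']) = ((start + k : Nat) : Int) := by
        push_cast [hk]
        omega
      have hsplit : pvSplitNL d = d.take k :: pvSplitNL (cs.drop (start + k + 1)) := by
        have hdec : d = d.take k ++ '\n' :: d.drop (k + 1) := by
          conv_lhs => rw [← List.take_append_drop k d]
          rw [hdk]
        have h1 : cs.drop (start + k + 1) = d.drop (k + 1) := by
          rw [hd, List.drop_drop]
          ring_nf
        rw [h1]
        conv_lhs => rw [hdec]
        exact pv_splitNL_append _ _ hline_no_nl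
      have hslice_line : PySem.List.slice cs (some (start : Int))
          (some (↑start + PySem.Chars.find d ['\n'])) = d.take k := by
        rw [hcast, PySem.List.slice_natCast, hd]
        congr 1
        omega
      rw [hslice_line]
      have hne : ¬(↑start + PySem.Chars.find d ['\n'] = (-1 : Int)) := by omega
      by_cases hh : pvHeadB (d.take k)
      · -- heading is this line: splice it out of cs
        rw [hsplit]
        simp only [if_pos hne, if_neg hne, List.findIdx?_cons, hh, if_true]
        have hnn : pvSplitNL (cs.drop (start + k + 1)) ≠ [] := pvSplitNL_ne_nil _
        simp only [List.take_zero, List.drop_succ_cons, List.drop_zero, List.nil_append]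
        rw [if_neg hnn]
        rw [pv_join_splitNL]
        rw [PySem.List.slice_to_natCast]
        have h1 : (↑start + PySem.Chars.find d ['\n']) + 1 = ((start + k + 1 : Nat) : Int) := by
          push_cast [hk]; omega
        rw [h1, PySem.List.slice_from_natCast]
      · -- not this line: advance the cursor past the newline
        rw [hsplit]
        simp only [if_pos hne, if_neg hne, List.findIdx?_cons, hh, if_false, Bool.false_eq_true]
        have htn : (↑start + PySem.Chars.find d ['\n']).toNat + 1 = start + k + 1 := by
          omega
        rw [htn]
        have hs' : start + k + 1 ≤ cs.length := by
          have hL : d.length = cs.length - start := by rw [hd]; simp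
          omega
        rw [ih (start + k + 1) hs' (by omega)]
        cases hM : (pvSplitNL (cs.drop (start + k + 1))).findIdx? pvHeadB with
        | none => simp
        | some j =>
          simp only [Option.map_some]
          set M := pvSplitNL (cs.drop (start + k + 1)) with hMdef
          simp only [List.take_succ_cons, List.drop_succ_cons]
          have htake : cs.take (start + k) = cs.take start ++ d.take k := by
            rw [List.take_add, hd]
          have htake1 : cs.take (start + k + 1) = cs.take start ++ d.take k ++ ['\n'] := by
            rw [List.take_add, List.take_add, hd]
            have h2 : (cs.drop (start + k)).take 1 = ['\n'] := by
              have h1 : cs.drop (start + k) = d.drop k := by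
                rw [hd, List.drop_drop]
              rw [h1, hdk]
              simp
            rw [h2]
          simp only [List.cons_append]
          split_ifs with h1 h2 h3
          · exact absurd h2 (by simp)
          · rw [h1, PySem.Chars.join_singleton]
            have h4 : start + k + 1 - 1 = start + k := by omega
            rw [h4, htake]
          · exact absurd h3 (by simp)
          · cases hM'c : M.take j ++ M.drop (j + 1) with
            | nil => exact absurd hM'c h1
            | cons x xs =>
              rw [PySem.Chars.join_cons_cons, htake1]
              simp

-- A-side: the fold with the found-flag, characterised by findIdx?
theorem pv_hash_space_not_double (l : List Char)
    (h : PySem.Chars.startswith l ['#', ' '] = true) :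
    PySem.Chars.startswith l ['#', '#', ' '] = false := by
  rw [PySem.Chars.startswith_iff] at h
  obtain ⟨t, ht⟩ := h
  by_contra hc
  rw [Bool.not_eq_false, PySem.Chars.startswith_iff] at hc
  obtain ⟨u, hu⟩ := hc
  rw [← ht] at hu
  simp at hu

theorem pv_stepA_cond (line : String) (acc : List String) :
    pvStepA (acc, false) line = if pvIsHeading line then (acc, true) else (acc ++ [line], false) := by
  by_cases h : pvIsHeading line
  · simp [pvIsHeading] at h
    simp [pvStepA, pvIsHeading, h, pv_hash_space_not_double _ h]
  · simp [pvIsHeading] at h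
    simp [pvStepA, pvIsHeading, h]

theorem pv_fold_found (lines : List String) (acc : List String) :
    lines.foldl pvStepA (acc, true) = (acc ++ lines, true) := by
  induction lines generalizing acc with
  | nil => simp
  | cons l ls ih => simp [pvStepA, ih]

theorem pv_fold_notfound (lines : List String) (acc : List String) :
    (lines.foldl pvStepA (acc, false)).1 =
      match lines.findIdx? pvIsHeading with
      | none => acc ++ lines
      | some i => acc ++ (lines.take i ++ lines.drop (i + 1)) := by
  induction lines generalizing acc with
  | nil => simp
  | cons l ls ih =>
    rw [List.foldl_cons, pv_stepA_cond]
    by_cases h : pvIsHeading l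
    · simp [h, pv_fold_found, List.findIdx?_cons]
    · rw [if_neg (by simp [h])]
      rw [ih]
      simp only [List.findIdx?_cons, h]
      cases hfi : ls.findIdx? pvIsHeading with
      | none => simp
      | some i => simp [List.take_succ_cons, List.drop_succ_cons]

theorem pv_lines_eq (content : String) :
    ((PySem.Str.split? content "\n").getD []) = (pvSplitNL content.toList).map String.ofList := by
  simp [PySem.Str.split?, PySem.Chars.split?, pv_splitOn_nl]

theorem pv_join_map (ls : List (List Char)) :
    PySem.Str.join "\n" (ls.map String.ofList) = String.ofList (PySem.Chars.join ['\n'] ls) := by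
  rw [← String.toList_inj, PySem.Str.toList_join]
  simp [List.map_map, Function.comp_def]

theorem pvB_eq (content : String) :
    strip_first_heading_py_alt content =
      String.ofList
        (match (pvSplitNL (content.toList.drop 0)).findIdx? pvHeadB with
         | none => content.toList
         | some i =>
           let ls := pvSplitNL (content.toList.drop 0)
           let ls' := ls.take i ++ ls.drop (i + 1)
           if ls' = [] then content.toList.take (0 - 1)
           else content.toList.take 0 ++ PySem.Chars.join ['\n'] ls') :=
  congrArg String.ofList (pv_goB_eq content.toList (content.toList.length + 1) 0 (Nat.zero_le _) (by omega))

theorem pvB_none (content : String)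
    (h : (pvSplitNL content.toList).findIdx? pvHeadB = none) :
    strip_first_heading_py_alt content = content := by
  have hB := pvB_eq content
  have h0 : (pvSplitNL (content.toList.drop 0)).findIdx? pvHeadB = none := by
    rw [List.drop_zero]; exact h
  simp only [h0] at hB
  rw [hB, String.ofList_toList]

theorem pvB_some (content : String) (i : Nat)
    (h : (pvSplitNL content.toList).findIdx? pvHeadB = some i) :
    strip_first_heading_py_alt content =
      String.ofList
        (if (pvSplitNL content.toList).take i ++ (pvSplitNL content.toList).drop (i + 1) = [] then []
         else PySem.Chars.join ['\n']
           ((pvSplitNL content.toList).take i ++ (pvSplitNL content.toList).drop (i + 1))) := by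
  have hB := pvB_eq content
  have h0 : (pvSplitNL (content.toList.drop 0)).findIdx? pvHeadB = some i := by
    rw [List.drop_zero]; exact h
  simp only [h0] at hB
  simp only [List.drop_zero, List.take_zero, List.nil_append, Nat.zero_sub] at hB
  exact hB

theorem pv_findIdx_bridge (L : List (List Char)) :
    (L.map String.ofList).findIdx? pvIsHeading = L.findIdx? pvHeadB := by
  induction L with
  | nil => simp
  | cons l t ih =>
    simp only [List.map_cons, List.findIdx?_cons, pv_heading_bridge, ih]

theorem strip_first_heading_py_spec : Claim_equal_strip_first_heading_py := by
  intro content _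
  simp only [Spec_strip_first_heading_py, strip_first_heading_py]
  rw [pv_fold_notfound, pv_lines_eq, pv_findIdx_bridge]
  cases h : (pvSplitNL content.toList).findIdx? pvHeadB with
  | none =>
    rw [pvB_none content h]
    simp only [List.nil_append]
    rw [pv_join_map, pv_join_splitNL, String.ofList_toList]
  | some i =>
    rw [pvB_some content i h]
    simp only [List.nil_append]
    rw [← List.map_take, ← List.map_drop, ← List.map_append, pv_join_map]
    by_cases he : (pvSplitNL content.toList).take i ++ (pvSplitNL content.toList).drop (i + 1) = []
    · rw [if_pos he, he, PySem.Chars.join_nil]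
    · rw [if_neg he]
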